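-- pv_equiv track=rewrite | github.com/ntoledo319/Rupture | kits/python-pivot/src/python_pivot/audit.py | _extract_min_version
-- ===== SOURCE A (Python) =====
-- from typing import Dict, List, Optional, Tuple
--
-- def _extract_min_version(spec: Optional[str]) -> Optional[str]:
--     """From a spec like '==1.2.0,>1.0' or '>=3.9' extract the pinned or lower-bound version."""
--     if not spec:
--         return None
--     for op in ("==", ">="):
--         for part in spec.split(","):
--             part = part.strip()
--             if part.startswith(op):
--                 return part[len(op):].strip()
--     return None
-- ===== SOURCE B (Python) =====
-- def _extract_min_version(spec):
--     """From a spec like '==1.2.0,>1.0' or '>=3.9' extract the pinned or lower-bound version."""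
--     if not spec:
--         return None
--     found = {}
--     for raw in spec.split(","):
--         part = raw.strip()
--         if part.startswith("=="):
--             found.setdefault("==", part[2:].strip())
--         elif part.startswith(">="):
--             found.setdefault(">=", part[2:].strip())
--     return found.get("==", found.get(">="))
-- ===== Notes on version B (the rewrite author's own statement) =====
-- stated objective: alternative
-- what changed: Replace A's two full scans of the comma-split parts (one scan per operator) by a single pass that records the first match per operator in a dict via setdefault and resolves the pin-over-lower-bound priority at the end.
import Mathlib
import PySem

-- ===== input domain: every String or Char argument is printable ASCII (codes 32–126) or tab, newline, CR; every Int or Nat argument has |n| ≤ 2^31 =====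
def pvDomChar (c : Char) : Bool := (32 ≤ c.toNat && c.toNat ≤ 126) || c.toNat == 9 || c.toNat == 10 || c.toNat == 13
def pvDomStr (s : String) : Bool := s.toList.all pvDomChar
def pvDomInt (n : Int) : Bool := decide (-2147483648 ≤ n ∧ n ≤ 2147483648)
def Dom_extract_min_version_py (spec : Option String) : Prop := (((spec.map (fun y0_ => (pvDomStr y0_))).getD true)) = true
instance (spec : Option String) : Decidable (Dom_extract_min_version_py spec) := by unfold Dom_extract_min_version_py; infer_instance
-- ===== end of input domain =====

-- B makes a single pass over the comma-split parts (recording the first '=='- and the first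
-- '>='-match in a dict, resolving the '==' over '>=' priority at the end) instead of A's two
-- full scans, one per operator.

-- ===== PORT A =====
-- inner loop: 'for part in spec.split(","): part = part.strip(); if part.startswith(op): return part[len(op):].strip()'
def pvA_findOp (op : List Char) : List (List Char) → Option String
  | [] => none
  | p :: rest =>
    let part := PySem.Chars.strip p
    if PySem.Chars.startswith part op then
      some (String.ofList (PySem.Chars.strip (PySem.Chars.slice part (some (PySem.Chars.len op)) none)))
    else pvA_findOp op rest

-- outer loop: 'for op in ("==", ">="):' with the inner loop's return propagated
def pvA_loopOps (parts : List (List Char)) : List (List Char) → Option String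
  | [] => none
  | op :: ops =>
    match pvA_findOp op parts with
    | some r => some r
    | none => pvA_loopOps parts ops

def extract_min_version_py (spec : Option String) : Option String :=
  match spec with
  | none => none
  | some s =>
    if s.toList = [] then none
    else pvA_loopOps (PySem.Chars.splitOn s.toList [',']) [['=', '='], ['>', '=']]

-- ===== PORT B =====
-- loop body: strip the part, record the first match per operator via dict.setdefault
def pvB_step (d : PySem.Dict String String) (raw : List Char) : PySem.Dict String String :=
  let part := PySem.Chars.strip raw
  if PySem.Chars.startswith part ['=', '='] then
    d.setdefault "==" (String.ofList (PySem.Chars.strip (PySem.Chars.slice part (some 2) none)))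
  else if PySem.Chars.startswith part ['>', '='] then
    d.setdefault ">=" (String.ofList (PySem.Chars.strip (PySem.Chars.slice part (some 2) none)))
  else d

def extract_min_version_py_alt (spec : Option String) : Option String :=
  match spec with
  | none => none
  | some s =>
    if s.toList = [] then none
    else
      let found := (PySem.Chars.splitOn s.toList [',']).foldl pvB_step PySem.Dict.empty
      -- found.get("==", found.get(">="))
      match found.get? "==" with
      | some v => some v
      | none => found.get? ">="

-- ===== PRECONDITION & SPEC =====
def Spec_extract_min_version_py (spec : Option String) (out : Option String) : Prop := out = extract_min_version_py_alt spec
instance (spec : Option String) (out : Option String) : Decidable (Spec_extract_min_version_py spec out) := by unfold Spec_extract_min_version_py; infer_instance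

-- ===== CLAIM (what is proved, stated in full; the proofs are below) =====
def Claim_equal_extract_min_version_py : Prop := ∀ (spec : Option String), Dom_extract_min_version_py spec → Spec_extract_min_version_py spec (extract_min_version_py spec)

-- ===== LEMMAS AND PROOFS =====

-- a stripped part cannot start with both "==" and ">="
lemma pv_not_both (part : List Char) (h : PySem.Chars.startswith part ['=', '='] = true) :
    PySem.Chars.startswith part ['>', '='] = false := by
  rw [PySem.Chars.startswith_iff] at h
  rcases h with ⟨t, rfl⟩
  rw [Bool.eq_false_iff]
  intro h2
  rw [PySem.Chars.startswith_iff] at h2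
  rcases h2 with ⟨t2, h2⟩
  simp at h2

-- the single-pass dict fold agrees, key by key, with A's per-operator scans
lemma pv_fold_get (parts : List (List Char)) (d : PySem.Dict String String) :
    ((parts.foldl pvB_step d).get? "==" = (d.get? "==").or (pvA_findOp ['=', '='] parts))
    ∧ ((parts.foldl pvB_step d).get? ">=" = (d.get? ">=").or (pvA_findOp ['>', '='] parts)) := by
  induction parts generalizing d with
  | nil => simp [pvA_findOp]
  | cons p rest ih =>
    simp only [List.foldl_cons, pvA_findOp, pvB_step]
    by_cases h1 : PySem.Chars.startswith (PySem.Chars.strip p) ['=', '='] = true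
    · have h2 := pv_not_both _ h1
      rw [h1, h2]
      simp only [if_true, if_false, Bool.false_eq_true]
      obtain ⟨ihl, ihr⟩ := ih (d.setdefault "==" _)
      refine ⟨?_, ?_⟩
      · rw [ihl, PySem.Dict.get?_setdefault_self]
        have hlen : PySem.Chars.len (['=', '='] : List Char) = (2 : Int) := by decide
        rw [hlen]
        cases d.get? "==" <;> simp
      · rw [ihr, PySem.Dict.get?_setdefault_of_ne d _ (show (">=" : String) ≠ "==" by decide)]
    · rw [Bool.not_eq_true] at h1
      simp only [h1, if_false, Bool.false_eq_true]
      by_cases h2 : PySem.Chars.startswith (PySem.Chars.strip p) ['>', '='] = true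
      · rw [h2]
        simp only [if_true]
        obtain ⟨ihl, ihr⟩ := ih (d.setdefault ">=" _)
        refine ⟨?_, ?_⟩
        · rw [ihl, PySem.Dict.get?_setdefault_of_ne d _ (show ("==" : String) ≠ ">=" by decide)]
        · rw [ihr, PySem.Dict.get?_setdefault_self]
          have hlen : PySem.Chars.len (['>', '='] : List Char) = (2 : Int) := by decide
          rw [hlen]
          cases d.get? ">=" <;> simp
      · rw [Bool.not_eq_true] at h2
        simp only [h2, if_false, Bool.false_eq_true]
        exact ih d

-- ===== VERDICT (by name: the statement is the Claim_ definition above) =====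
theorem extract_min_version_py_spec : Claim_equal_extract_min_version_py := by
  intro spec _
  unfold Spec_extract_min_version_py extract_min_version_py extract_min_version_py_alt
  match spec with
  | none => rfl
  | some s =>
    by_cases hs : s.toList = []
    · simp [hs]
    · simp only [hs, if_false]
      obtain ⟨hl, hr⟩ := pv_fold_get (PySem.Chars.splitOn s.toList [',']) PySem.Dict.empty
      rw [PySem.Dict.get?_empty] at hl hr
      simp only [Option.none_or] at hl hr
      simp only [pvA_loopOps, hl, hr]
      cases pvA_findOp ['=', '='] (PySem.Chars.splitOn s.toList [',']) <;>
        cases pvA_findOp ['>', '='] (PySem.Chars.splitOn s.toList [',']) <;> rfl
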